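-- pv_equiv track=rewrite | github.com/ganshyam135/Unstop-DSA-Bootcamp | SubArrays/Solution to Question - 1.py | count_tribonacci_subarrays
-- ===== SOURCE A (Python) =====
-- def count_tribonacci_subarrays(n, arr):
--     # Step 1: Compute Tribonacci numbers up to 10^5
--     MODULO = 10**9 + 7
--     tribonacci_set = set()
--     a, b, c = 0, 1, 1
--     while a <= 10**5:
--         tribonacci_set.add(a)
--         a, b, c = b, c, (a + b + c) % MODULO  # Compute next Tribonacci
--
--     # Step 2: Count valid subarrays
--     count = 0
--     start = 0  # Marks the start of a valid sequence
--
--     while start < n: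
--         if arr[start] not in tribonacci_set:
--             start += 1
--             continue
--
--         end = start
--         while end < n and arr[end] in tribonacci_set:
--             end += 1
--
--         length = end - start
--         count += (length * (length + 1)) // 2  # Sum of 1 to length
--
--         start = end  # Move to next potential valid subarray
--
--     return count % MODULO  # Return the count with modulo
-- ===== SOURCE B (Python) =====
-- def count_tribonacci_subarrays(n, arr):
--     MODULO = 10**9 + 7
--     tribonacci_set = set()
--     a, b, c = 0, 1, 1
--     while a <= 10**5:
--         tribonacci_set.add(a)
--         a, b, c = b, c, (a + b + c) % MODULO
--
--     # Single flat pass: `run` = length of the current streak of tribonacci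
--     # elements; each tribonacci element extends every subarray ending at it,
--     # contributing `run` new subarrays.
--     count = 0
--     run = 0
--     for x in arr[:max(n, 0)]:
--         if x in tribonacci_set:
--             run += 1
--             count += run
--         else:
--             run = 0
--     return count % MODULO
-- ===== Notes on version B (the rewrite author's own statement) =====
-- stated objective: simpler
-- what changed: Replaced the nested index-based run-finding loops plus per-run triangular closed form with one flat pass over the first n elements that keeps a running streak length and accumulates subarray counts incrementally.
-- outside the precondition, e.g. on count_tribonacci_subarrays(2, [1]): A raises IndexError, B returns 1
import Mathlib
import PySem

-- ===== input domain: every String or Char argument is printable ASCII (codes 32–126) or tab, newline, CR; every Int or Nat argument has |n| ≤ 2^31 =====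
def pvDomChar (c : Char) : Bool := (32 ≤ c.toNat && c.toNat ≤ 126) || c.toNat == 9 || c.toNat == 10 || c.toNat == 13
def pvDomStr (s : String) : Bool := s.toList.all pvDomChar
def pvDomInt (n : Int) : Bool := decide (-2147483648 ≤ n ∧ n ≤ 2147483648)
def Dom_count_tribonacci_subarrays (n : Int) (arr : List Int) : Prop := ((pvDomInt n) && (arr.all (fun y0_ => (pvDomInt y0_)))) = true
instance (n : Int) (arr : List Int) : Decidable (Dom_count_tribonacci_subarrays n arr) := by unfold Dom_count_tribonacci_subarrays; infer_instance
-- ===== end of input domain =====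

-- B replaces A's nested run-finding loops + per-run triangular formula by one flat pass
-- accumulating a running streak counter (objective: simpler).

-- ===== PORT A =====
-- Step 1 of both Pythons: the tribonacci-set precompute (identical line by line in A and B).
-- Python's `while a <= 10**5` is input-independent and stops itself after 21 iterations;
-- fuel 30 is ample, so this is exact.
def tribLoop : Nat → Int → Int → Int → PySem.Set Int → PySem.Set Int
  | 0, _, _, _, s => s
  | f+1, a, b, c, s =>
    if a ≤ 100000 then
      tribLoop f b c (PySem.Int.mod (a + b + c) 1000000007) (PySem.Set.add s a)
    else s

def tribSet : PySem.Set Int := tribLoop 30 0 1 1 PySem.Set.empty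

-- inner `while end < n and arr[end] in tribonacci_set: end += 1`
-- (arr[end] via pyGetD: exact, since Pre_ guarantees 0 ≤ end < n ≤ len(arr) whenever it is read)
def aInner (n : Int) (arr : List Int) : Nat → Int → Int
  | 0, e => e
  | f+1, e =>
    if e < n then
      if tribSet.contains (PySem.List.pyGetD arr e 0) then aInner n arr f (e + 1)
      else e
    else e

-- outer `while start < n` loop; start strictly increases, so fuel n.toNat + 1 is exact
def aOuter (n : Int) (arr : List Int) : Nat → Int → Int → Int
  | 0, _, count => count
  | f+1, start, count =>
    if start < n then
      if tribSet.contains (PySem.List.pyGetD arr start 0) = false then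
        aOuter n arr f (start + 1) count
      else
        let e := aInner n arr ((n - start).toNat + 1) start
        aOuter n arr f e (count + PySem.Int.floordiv ((e - start) * (e - start + 1)) 2)
    else count

def count_tribonacci_subarrays (n : Int) (arr : List Int) : Int :=
  PySem.Int.mod (aOuter n arr (n.toNat + 1) 0 0) 1000000007

-- ===== PORT B =====
-- `for x in arr[:max(n, 0)]` with accumulators (run, count)
def bLoop : List Int → Int → Int → Int
  | [], _, count => count
  | x :: xs, run, count =>
    if tribSet.contains x then bLoop xs (run + 1) (count + (run + 1))
    else bLoop xs 0 count

def count_tribonacci_subarrays_alt (n : Int) (arr : List Int) : Int :=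
  PySem.Int.mod (bLoop (PySem.List.slice arr none (some (max n 0))) 0 0) 1000000007

-- ===== PRECONDITION & SPEC =====
-- A raises IndexError as soon as start reaches len(arr) < n; excluded here.
def Pre_count_tribonacci_subarrays (n : Int) (arr : List Int) : Prop := n ≤ (arr.length : Int)
instance (n : Int) (arr : List Int) : Decidable (Pre_count_tribonacci_subarrays n arr) := by unfold Pre_count_tribonacci_subarrays; infer_instance
def pvWitness_count_tribonacci_subarrays : Int × List Int := (3, [1, 6, 2])

def Spec_count_tribonacci_subarrays (n : Int) (arr : List Int) (out : Int) : Prop := out = count_tribonacci_subarrays_alt n arr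
instance (n : Int) (arr : List Int) (out : Int) : Decidable (Spec_count_tribonacci_subarrays n arr out) := by unfold Spec_count_tribonacci_subarrays; infer_instance

-- ===== CLAIM (what is proved, stated in full; the proofs are below) =====
def Claim_equal_count_tribonacci_subarrays : Prop := ∀ (n : Int) (arr : List Int), Dom_count_tribonacci_subarrays n arr → Pre_count_tribonacci_subarrays n arr → Spec_count_tribonacci_subarrays n arr (count_tribonacci_subarrays n arr)

-- ===== LEMMAS AND PROOFS =====

-- the part of arr that the loops actually visit: positions e, e+1, …, n-1
def seg (n : Int) (arr : List Int) (e : Int) : List Int := (arr.take n.toNat).drop e.toNat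

-- length of the leading streak of tribonacci elements
def runLen : List Int → Nat
  | [] => 0
  | x :: xs => if tribSet.contains x then runLen xs + 1 else 0

-- the triangular number, as the recurrence the proof steps through
def tri : Nat → Int
  | 0 => 0
  | l + 1 => tri l + (l + 1)

theorem runLen_le (l : List Int) : runLen l ≤ l.length := by
  induction l with
  | nil => simp [runLen]
  | cons x xs ih =>
      simp only [runLen, List.length_cons]
      split <;> omega

theorem tri_eq_floordiv (l : Nat) :
    PySem.Int.floordiv ((l : Int) * ((l : Int) + 1)) 2 = tri l := by
  rw [PySem.Int.floordiv_eq_ediv_of_pos (by norm_num)]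
  induction l with
  | zero => simp [tri]
  | succ k ih =>
      have h : ((k + 1 : Nat) : Int) * (((k + 1 : Nat) : Int) + 1)
          = (k : Int) * ((k : Int) + 1) + ((k : Int) + 1) * 2 := by push_cast; ring
      rw [h, Int.add_mul_ediv_right _ _ (by norm_num), ih]
      simp [tri]

theorem bLoop_add (xs : List Int) (run c : Int) : bLoop xs run c = c + bLoop xs run 0 := by
  induction xs generalizing run c with
  | nil => simp [bLoop]
  | cons x xs ih =>
      simp only [bLoop]
      split
      · rw [ih (run + 1) (c + (run + 1)), ih (run + 1) (0 + (run + 1))]; ring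
      · exact ih 0 c

-- B consumes the leading streak of length runLen l, collecting exactly the
-- triangular contribution, then restarts with run = 0 on the remainder
theorem bLoop_front (l : List Int) (r c : Int) :
    bLoop l r c = c + (runLen l : Int) * r + tri (runLen l) + bLoop (l.drop (runLen l)) 0 0 := by
  induction l generalizing r c with
  | nil => simp [bLoop, runLen, tri]
  | cons x xs ih =>
      cases hx : tribSet.contains x with
      | true =>
          simp at hx
          rw [show bLoop (x :: xs) r c = bLoop xs (r + 1) (c + (r + 1)) by simp [bLoop, hx],
            show runLen (x :: xs) = runLen xs + 1 by simp [runLen, hx],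
            List.drop_succ_cons, ih (r + 1) (c + (r + 1))]
          simp only [tri]
          push_cast
          ring
      | false =>
          simp at hx
          rw [show bLoop (x :: xs) r c = bLoop xs 0 c by simp [bLoop, hx],
            show runLen (x :: xs) = 0 by simp [runLen, hx],
            List.drop_zero,
            show bLoop (x :: xs) 0 0 = bLoop xs 0 0 by simp [bLoop, hx],
            bLoop_add xs 0 c]
          simp [tri]

theorem pyGetD_idx (arr : List Int) (i : Int) (h0 : 0 ≤ i) (h : i.toNat < arr.length) :
    PySem.List.pyGetD arr i 0 = arr[i.toNat] := by
  have h1 : i < (arr.length : Int) := by omega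
  simp [PySem.List.pyGetD, PySem.List.pyGet?, PySem.List.pyIdx?, h0, h1]

theorem seg_cons (n : Int) (arr : List Int) (e : Int)
    (h0 : 0 ≤ e) (hlt : e < n) (hn : n ≤ (arr.length : Int)) :
    ∃ (h : e.toNat < arr.length), seg n arr e = arr[e.toNat] :: seg n arr (e + 1) := by
  have he : e.toNat < arr.length := by omega
  refine ⟨he, ?_⟩
  have hlen : e.toNat < (arr.take n.toNat).length := by
    simp only [List.length_take]; omega
  rw [seg, List.drop_eq_getElem_cons hlen]
  have : (arr.take n.toNat)[e.toNat] = arr[e.toNat] := List.getElem_take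
  rw [this, seg]
  have harith : (e + 1).toNat = e.toNat + 1 := by omega
  rw [harith]

theorem seg_nil (n : Int) (arr : List Int) (e : Int) (h : n ≤ e) : seg n arr e = [] := by
  rw [seg, List.drop_eq_nil_iff]
  have h2 : (List.take n.toNat arr).length = min n.toNat arr.length := List.length_take
  omega

theorem seg_length (n : Int) (arr : List Int) (e : Int)
    (h0 : 0 ≤ e) (he : e ≤ n) (hn : n ≤ (arr.length : Int)) :
    (seg n arr e).length = (n - e).toNat := by
  rw [seg]
  simp only [List.length_drop, List.length_take]
  omega

theorem seg_drop (n : Int) (arr : List Int) (e : Int) (k : Nat) (h0 : 0 ≤ e) :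
    seg n arr (e + (k : Int)) = (seg n arr e).drop k := by
  rw [seg, seg, List.drop_drop]
  congr 1
  omega

theorem aInner_eq (n : Int) (arr : List Int) (hn : n ≤ (arr.length : Int))
    (f : Nat) (e : Int) (h0 : 0 ≤ e) (he : e ≤ n) (hf : (n - e).toNat ≤ f) :
    aInner n arr f e = e + (runLen (seg n arr e) : Int) := by
  induction f generalizing e with
  | zero =>
      have hEn : n ≤ e := by omega
      rw [seg_nil n arr e hEn]
      simp [aInner, runLen]
  | succ f ih =>
      by_cases hlt : e < n
      · obtain ⟨hidx, hseg⟩ := seg_cons n arr e h0 hlt hn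
        cases hx : tribSet.contains arr[e.toNat] with
        | true =>
            simp at hx
            rw [show aInner n arr (f + 1) e = aInner n arr f (e + 1) by
                simp [aInner, hlt, pyGetD_idx arr e h0 hidx, hx],
              ih (e + 1) (by omega) (by omega) (by omega), hseg,
              show runLen (arr[e.toNat] :: seg n arr (e + 1)) = runLen (seg n arr (e + 1)) + 1 by
                simp [runLen, hx]]
            push_cast
            ring
        | false =>
            simp at hx
            rw [show aInner n arr (f + 1) e = e by
                simp [aInner, hlt, pyGetD_idx arr e h0 hidx, hx],
              hseg,
              show runLen (arr[e.toNat] :: seg n arr (e + 1)) = 0 by simp [runLen, hx]]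
            simp
      · have hEn : n ≤ e := by omega
        rw [seg_nil n arr e hEn]
        simp [aInner, hlt, runLen]

theorem aOuter_eq (n : Int) (arr : List Int) (hn : n ≤ (arr.length : Int))
    (f : Nat) (start c : Int) (h0 : 0 ≤ start) (hs : start ≤ n) (hf : (n - start).toNat ≤ f) :
    aOuter n arr f start c = c + bLoop (seg n arr start) 0 0 := by
  induction f generalizing start c with
  | zero =>
      have hEn : n ≤ start := by omega
      rw [seg_nil n arr start hEn]
      simp [aOuter, bLoop]
  | succ f ih =>
      by_cases hlt : start < n
      · obtain ⟨hidx, hseg⟩ := seg_cons n arr start h0 hlt hn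
        cases hx : tribSet.contains arr[start.toNat] with
        | false =>
            simp at hx
            rw [show aOuter n arr (f + 1) start c = aOuter n arr f (start + 1) c by
                simp [aOuter, hlt, pyGetD_idx arr start h0 hidx, hx],
              ih (start + 1) c (by omega) (by omega) (by omega), hseg,
              show bLoop (arr[start.toNat] :: seg n arr (start + 1)) 0 0
                  = bLoop (seg n arr (start + 1)) 0 0 by simp [bLoop, hx]]
        | true =>
            simp at hx
            rw [show aOuter n arr (f + 1) start c
                = aOuter n arr f (aInner n arr ((n - start).toNat + 1) start)
                    (c + PySem.Int.floordiv
                      ((aInner n arr ((n - start).toNat + 1) start - start) *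
                        (aInner n arr ((n - start).toNat + 1) start - start + 1)) 2) by
                simp [aOuter, hlt, pyGetD_idx arr start h0 hidx, hx]]
            set k : Nat := runLen (seg n arr start) with hk
            have hk1 : 1 ≤ k := by
              rw [hk, hseg]
              simp [runLen, hx]
            have hkle : k ≤ (seg n arr start).length := hk ▸ runLen_le _
            have hsegLen : (seg n arr start).length = (n - start).toNat :=
              seg_length n arr start h0 (by omega) hn
            have hInner : aInner n arr ((n - start).toNat + 1) start = start + (k : Int) :=
              aInner_eq n arr hn _ start h0 (by omega) (by omega)
            have harg : start + (k : Int) - start = (k : Int) := by ring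
            rw [hInner, harg, tri_eq_floordiv k,
              ih (start + (k : Int)) (c + tri k) (by omega) (by omega) (by omega),
              seg_drop n arr start k h0]
            conv_rhs => rw [bLoop_front (seg n arr start) 0 0]
            rw [← hk]
            ring
      · have hEn : n ≤ start := by omega
        rw [seg_nil n arr start hEn]
        simp [aOuter, hlt, bLoop]

theorem slice_eq_seg (n : Int) (arr : List Int) :
    PySem.List.slice arr none (some (max n 0)) = seg n arr 0 := by
  have hmax : max n 0 = ((n.toNat : Nat) : Int) := by omega
  rw [hmax, PySem.List.slice_to_natCast, seg]
  simp

-- ===== VERDICT (by name: the statement is the Claim_ definition above) =====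
theorem count_tribonacci_subarrays_spec : Claim_equal_count_tribonacci_subarrays := by
  intro n arr _ hpre
  unfold Spec_count_tribonacci_subarrays count_tribonacci_subarrays count_tribonacci_subarrays_alt
  congr 1
  by_cases hn0 : 0 ≤ n
  · rw [aOuter_eq n arr hpre (n.toNat + 1) 0 0 le_rfl hn0 (by omega), slice_eq_seg n arr]
    simp
  · have h1 : ¬ (0 : Int) < n := by omega
    have h2 : PySem.List.slice arr none (some (max n 0)) = [] := by
      have hmax : max n 0 = (((0 : Nat) : Nat) : Int) := by omega
      rw [hmax, PySem.List.slice_to_natCast]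
      simp
    rw [h2]
    simp [aOuter, bLoop, h1]
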